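-- pv_equiv track=rewrite | github.com/avnishsinghhh/8_Queens_Puzzle-Python_Genetic_Algorithm | eight_queens_puzzle.py | findDiagonal
-- ===== SOURCE A (Python) =====
-- def findDiagonal(index,lst):
--
--     diag1=[];
--     diag2=[];
--
--     x1=y1=x2=y2=0;
--
--     x1=lst;
--     y1=index;
--     while (x1 > -1 and x1 < 8 and y1 > -1 and y1 < 8):
--         if y1 != lst:
--             diag1.append([x1,y1]);
--         x1=x1+1;
--         y1=y1-1;
--
--
--     x1=lst;
--     y1=index;
--     while (x1 > -1 and x1 < 8 and y1 > -1 and y1 < 8):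
--         if diag1.count([x1,y1]) == 0 and y1 != lst:
--             diag1.append([x1,y1]);
--
--         x1=x1-1;
--         y1=y1+1;
--
--
--     x2=lst;
--     y2=index;
--     while (x2 > -1 and x2 < 8 and y2 > -1 and y2 < 8):
--         if x2 != lst:
--             diag2.append([y2,x2]);
--
--         x2=x2-1;
--         y2=y2-1;
--
--     x2=lst;
--     y2=index;
--     while (x2 > -1 and x2 < 8 and y2 > -1 and y2 < 8):
--         if diag2.count([y2,x2]) == 0 and x2 != lst:
--             diag2.append([y2,x2]);
--
--         x2=x2+1;
--         y2=y2+1;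
--
--     diag1.sort(key = lambda x : x[1], reverse=True);
--     diag2.sort(key = lambda x : x[1], reverse=False);
--
--     return diag1, diag2;
-- ===== SOURCE B (Python) =====
-- def findDiagonal(index, lst):
--     if not (0 <= lst < 8 and 0 <= index < 8):
--         return [], []
--     s = lst + index
--     d = index - lst
--     diag1 = [[x, s - x] for x in range(8) if 0 <= s - x < 8 and s - x != lst]
--     diag2 = [[x + d, x] for x in range(8) if 0 <= x + d < 8 and x != lst]
--     return diag1, diag2
-- ===== Notes on version B (the rewrite author's own statement) =====
-- stated objective: simpler
-- what changed: Replaces A's four directional while-loop walks plus a .count dedup pass and two sorts by a bounds guard and a direct closed-form comprehension of each diagonal, emitted already in the final sorted order.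
import Mathlib
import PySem

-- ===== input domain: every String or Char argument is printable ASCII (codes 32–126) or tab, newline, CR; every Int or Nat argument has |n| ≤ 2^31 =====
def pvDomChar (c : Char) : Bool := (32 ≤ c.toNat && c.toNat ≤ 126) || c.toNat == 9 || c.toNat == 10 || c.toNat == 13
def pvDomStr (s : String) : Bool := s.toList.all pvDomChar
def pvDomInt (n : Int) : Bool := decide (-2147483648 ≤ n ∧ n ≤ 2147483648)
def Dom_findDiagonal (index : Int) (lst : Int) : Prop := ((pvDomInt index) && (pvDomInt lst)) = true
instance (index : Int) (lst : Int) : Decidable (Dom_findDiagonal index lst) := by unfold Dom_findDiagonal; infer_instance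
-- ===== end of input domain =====

-- B replaces A's four directional board walks (with a .count dedup pass) by a direct
-- closed-form enumeration of each diagonal in its final sorted order (objective: simpler).

-- ===== PORT A =====
-- The four while loops take a Nat fuel for totality; each runs at most 8 iterations,
-- so fuel 16 makes the Lean loop compute exactly what the Python while loop computes.
-- first while loop: (x1,y1) steps (+1,-1); append [x1,y1] when y1 != lst
def fdLoop1 : Nat → Int → Int → Int → List (List Int) → List (List Int)
  | 0, _, _, _, diag => diag
  | fuel + 1, lst, x1, y1, diag =>
    if x1 > -1 ∧ x1 < 8 ∧ y1 > -1 ∧ y1 < 8 then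
      fdLoop1 fuel lst (x1 + 1) (y1 - 1) (if y1 ≠ lst then diag ++ [[x1, y1]] else diag)
    else diag

-- second while loop: (x1,y1) steps (-1,+1); append when not present and y1 != lst
def fdLoop2 : Nat → Int → Int → Int → List (List Int) → List (List Int)
  | 0, _, _, _, diag => diag
  | fuel + 1, lst, x1, y1, diag =>
    if x1 > -1 ∧ x1 < 8 ∧ y1 > -1 ∧ y1 < 8 then
      fdLoop2 fuel lst (x1 - 1) (y1 + 1)
        (if PySem.List.count diag [x1, y1] = 0 ∧ y1 ≠ lst then diag ++ [[x1, y1]] else diag)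
    else diag

-- third while loop: (x2,y2) steps (-1,-1); append [y2,x2] when x2 != lst
def fdLoop3 : Nat → Int → Int → Int → List (List Int) → List (List Int)
  | 0, _, _, _, diag => diag
  | fuel + 1, lst, x2, y2, diag =>
    if x2 > -1 ∧ x2 < 8 ∧ y2 > -1 ∧ y2 < 8 then
      fdLoop3 fuel lst (x2 - 1) (y2 - 1) (if x2 ≠ lst then diag ++ [[y2, x2]] else diag)
    else diag

-- fourth while loop: (x2,y2) steps (+1,+1); append when not present and x2 != lst
def fdLoop4 : Nat → Int → Int → Int → List (List Int) → List (List Int)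
  | 0, _, _, _, diag => diag
  | fuel + 1, lst, x2, y2, diag =>
    if x2 > -1 ∧ x2 < 8 ∧ y2 > -1 ∧ y2 < 8 then
      fdLoop4 fuel lst (x2 + 1) (y2 + 1)
        (if PySem.List.count diag [y2, x2] = 0 ∧ x2 ≠ lst then diag ++ [[y2, x2]] else diag)
    else diag

def findDiagonal (index : Int) (lst : Int) : List (List Int) × List (List Int) :=
  let diag1 := fdLoop1 16 lst lst index []
  let diag1 := fdLoop2 16 lst lst index diag1
  let diag2 := fdLoop3 16 lst lst index []
  let diag2 := fdLoop4 16 lst lst index diag2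
  let diag1 := PySem.List.sorted diag1 (fun x => PySem.List.pyGetD x 1 0) true
  let diag2 := PySem.List.sorted diag2 (fun x => PySem.List.pyGetD x 1 0) false
  (diag1, diag2)

-- ===== PORT B =====
def findDiagonal_alt (index : Int) (lst : Int) : List (List Int) × List (List Int) :=
  if 0 ≤ lst ∧ lst < 8 ∧ 0 ≤ index ∧ index < 8 then
    let s := lst + index
    let d := index - lst
    let diag1 := (PySem.List.pyRange 0 8 1).filterMap
      (fun x => if 0 ≤ s - x ∧ s - x < 8 ∧ s - x ≠ lst then some [x, s - x] else none)
    let diag2 := (PySem.List.pyRange 0 8 1).filterMap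
      (fun x => if 0 ≤ x + d ∧ x + d < 8 ∧ x ≠ lst then some [x + d, x] else none)
    (diag1, diag2)
  else ([], [])

-- ===== PRECONDITION & SPEC =====
def Spec_findDiagonal (index : Int) (lst : Int) (out : List (List Int) × List (List Int)) : Prop := out = findDiagonal_alt index lst
instance (index : Int) (lst : Int) (out : List (List Int) × List (List Int)) : Decidable (Spec_findDiagonal index lst out) := by unfold Spec_findDiagonal; infer_instance

-- ===== CLAIM (what is proved, stated in full; the proofs are below) =====
def Claim_equal_findDiagonal : Prop := ∀ (index : Int) (lst : Int), Dom_findDiagonal index lst → Spec_findDiagonal index lst (findDiagonal index lst)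

-- ===== LEMMAS AND PROOFS =====

-- off the board, every one of A's loops exits at once
theorem findDiagonal_off (index lst : Int)
    (h : ¬ (0 ≤ lst ∧ lst < 8 ∧ 0 ≤ index ∧ index < 8)) :
    findDiagonal index lst = ([], []) := by
  have hc : ¬ (lst > -1 ∧ lst < 8 ∧ index > -1 ∧ index < 8) := by omega
  unfold findDiagonal
  simp [fdLoop1, fdLoop2, fdLoop3, fdLoop4, hc, PySem.List.sorted]

theorem findDiagonal_on (index lst : Int)
    (h : 0 ≤ lst ∧ lst < 8 ∧ 0 ≤ index ∧ index < 8) :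
    findDiagonal index lst = findDiagonal_alt index lst := by
  obtain ⟨h1, h2, h3, h4⟩ := h
  interval_cases lst <;> interval_cases index <;> decide

-- ===== VERDICT (by name: the statement is the Claim_ definition above) =====
theorem findDiagonal_spec : Claim_equal_findDiagonal := by
  intro index lst _
  unfold Spec_findDiagonal
  by_cases h : 0 ≤ lst ∧ lst < 8 ∧ 0 ≤ index ∧ index < 8
  · exact findDiagonal_on index lst h
  · rw [findDiagonal_off index lst h]
    unfold findDiagonal_alt
    simp [h]
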